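-- pv_equiv track=rewrite | github.com/pkprog/lc_steps_non_decreasing_array_py | Solution.py | split_list_old
-- ===== SOURCE A (Python) =====
-- from typing import List
--
-- def split_list_old(nums: List[int]) -> List[List[int]]:
--     lowering_lists: List[List[int]] = []
--
--     prev: int = -1
--     curr: List[int] = []
--     for i, n in enumerate(nums):
--         if i == 0:
--             curr.append(n)
--             lowering_lists.append(curr)
--         else:
--             if prev > n:
--                 curr = [n]
--                 lowering_lists.append(curr)
--             else:
--                 curr.append(n)
--
--         prev = n
--
--     return lowering_lists
-- ===== SOURCE B (Python) =====
-- def split_list_old(nums):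
--     # Build the segmentation back-to-front: walk the list in reverse, and either
--     # extend the following segment (no decrease) or open a new one.  Segments are
--     # kept in reverse order and each is stored reversed so all work is appends;
--     # one final double reversal puts everything in order.
--     rsegs = []
--     for n in reversed(nums):
--         if rsegs and n <= rsegs[-1][-1]:
--             rsegs[-1].append(n)
--         else:
--             rsegs.append([n])
--     return [s[::-1] for s in reversed(rsegs)]
-- ===== Notes on version B (the rewrite author's own statement) =====
-- stated objective: alternative
-- what changed: B builds the segments back-to-front by a single reverse traversal that prepends each element to the following segment or opens a new one, instead of A's forward loop with an index test, a prev variable and a mutated current-sublist alias.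
import Mathlib
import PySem

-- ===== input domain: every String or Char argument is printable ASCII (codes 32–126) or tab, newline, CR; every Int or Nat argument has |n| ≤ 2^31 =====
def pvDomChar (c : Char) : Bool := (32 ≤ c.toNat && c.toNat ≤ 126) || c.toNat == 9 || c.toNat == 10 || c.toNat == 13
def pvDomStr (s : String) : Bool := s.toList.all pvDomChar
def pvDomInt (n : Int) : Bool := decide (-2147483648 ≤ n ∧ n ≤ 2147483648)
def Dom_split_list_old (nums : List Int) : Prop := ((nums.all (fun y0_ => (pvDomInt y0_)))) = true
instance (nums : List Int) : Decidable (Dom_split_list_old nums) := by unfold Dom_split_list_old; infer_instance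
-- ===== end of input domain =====

-- B builds the segmentation back-to-front in one reverse traversal (prepend to the
-- following segment, or open a new one), instead of A's forward loop with an index
-- test, a prev variable and a mutated current-sublist alias. Objective: alternative.

-- ===== PORT A =====
-- A's loop state: prev, and lowering_lists kept newest-segment-first (curr is its
-- head, mutation of curr = replacing the head); reversed back at the end.
def pvStepA (st : Int × List (List Int)) (p : Int × Int) : Int × List (List Int) :=
  let segs :=
    if p.1 == 0 then [p.2] :: st.2
    else if st.1 > p.2 then [p.2] :: st.2
    else match st.2 with
         | c :: rest => (c ++ [p.2]) :: rest
         | [] => [[p.2]]   -- unreachable: lowering_lists is nonempty whenever i ≥ 1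
  (p.2, segs)

def split_list_old (nums : List Int) : List (List Int) :=
  ((PySem.List.enumerate nums 0).foldl pvStepA (-1, [])).2.reverse

-- ===== PORT B =====
-- B keeps rsegs with the last (= earliest-in-final-order) segment first and each
-- segment reversed (the usual reversed-accumulator transliteration of Python's
-- appends), so the final double reversal of Source B is the identity here.
def pvStepB (n : Int) (res : List (List Int)) : List (List Int) :=
  match res with
  | (m :: seg) :: rest => if n ≤ m then (n :: m :: seg) :: rest else [n] :: (m :: seg) :: rest
  | _ => [n] :: res

def split_list_old_alt (nums : List Int) : List (List Int) :=
  nums.reverse.foldl (fun res n => pvStepB n res) []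

-- ===== PRECONDITION & SPEC =====
def Spec_split_list_old (nums : List Int) (out : List (List Int)) : Prop := out = split_list_old_alt nums
instance (nums : List Int) (out : List (List Int)) : Decidable (Spec_split_list_old nums out) := by unfold Spec_split_list_old; infer_instance

-- ===== CLAIM (what is proved, stated in full; the proofs are below) =====
def Claim_equal_split_list_old : Prop := ∀ (nums : List Int), Dom_split_list_old nums → Spec_split_list_old nums (split_list_old nums)

-- ===== LEMMAS AND PROOFS =====

-- B as a right fold (foldl over the reverse = foldr).
lemma alt_eq_foldr (nums : List Int) : split_list_old_alt nums = nums.foldr pvStepB [] := by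
  simp [split_list_old_alt, List.foldl_reverse]

-- 'glue curr prev segs': attach the finished prefix segment curr (whose last
-- element is prev) in front of the segmentation segs of the remaining list.
def pvGlue (curr : List Int) (prev : Int) (segs : List (List Int)) : List (List Int) :=
  match segs with
  | (m :: s) :: rest => if prev > m then curr :: segs else (curr ++ m :: s) :: rest
  | _ => curr :: segs

lemma stepB_eq_glue (n : Int) (res : List (List Int)) : pvStepB n res = pvGlue [n] n res := by
  cases res with
  | nil => simp [pvStepB, pvGlue]
  | cons h t =>
    cases h with
    | nil => simp [pvStepB, pvGlue]
    | cons m s =>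
      simp only [pvStepB, pvGlue]
      rcases lt_or_ge m n with hlt | hge
      · rw [if_neg (by omega), if_pos (by omega)]
      · rw [if_pos (by omega), if_neg (by omega)]
        simp

lemma glue_gt (curr : List Int) (prev n : Int) (segs : List (List Int)) (h : prev > n) :
    pvGlue curr prev (pvGlue [n] n segs) = curr :: pvGlue [n] n segs := by
  cases segs with
  | nil => simp [pvGlue, if_pos h]
  | cons s rest =>
    cases s with
    | nil => simp [pvGlue, if_pos h]
    | cons m t =>
      simp only [pvGlue]
      split_ifs with h1 <;> simp [if_pos h]

lemma glue_le (curr : List Int) (prev n : Int) (segs : List (List Int)) (h : ¬ prev > n) :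
    pvGlue curr prev (pvGlue [n] n segs) = pvGlue (curr ++ [n]) n segs := by
  cases segs with
  | nil => simp [pvGlue, if_neg h]
  | cons s rest =>
    cases s with
    | nil => simp [pvGlue, if_neg h]
    | cons m t =>
      simp only [pvGlue]
      split_ifs with h1 <;> simp [if_neg h, List.append_assoc]

-- Master invariant for A's loop after the first iteration (indices k ≥ 1).
lemma master (xs : List Int) : ∀ (k prev : Int) (curr : List Int) (done : List (List Int)),
    1 ≤ k →
    ((PySem.List.enumerate xs k).foldl pvStepA (prev, curr :: done)).2
      = (pvGlue curr prev (xs.foldr pvStepB [])).reverse ++ done := by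
  induction xs with
  | nil => intro k prev curr done hk; simp [PySem.List.enumerate_nil, pvGlue]
  | cons n rest ih =>
    intro k prev curr done hk
    rw [PySem.List.enumerate_cons]
    have hk0 : (k == 0) = false := by simp; omega
    simp only [List.foldl_cons]
    show ((PySem.List.enumerate rest (k+1)).foldl pvStepA (pvStepA (prev, curr :: done) (k, n))).2 = _
    simp only [pvStepA, hk0, Bool.false_eq_true, if_false]
    by_cases hgt : prev > n
    · rw [if_pos hgt]
      rw [ih (k+1) n [n] (curr :: done) (by omega)]
      rw [List.foldr_cons, stepB_eq_glue, glue_gt curr prev n _ hgt]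
      simp
    · rw [if_neg hgt]
      rw [ih (k+1) n (curr ++ [n]) done (by omega)]
      rw [List.foldr_cons, stepB_eq_glue, glue_le curr prev n _ hgt]

-- ===== VERDICT (by name: the statement is the Claim_ definition above) =====
theorem split_list_old_spec : Claim_equal_split_list_old := by
  intro nums _
  unfold Spec_split_list_old
  rw [alt_eq_foldr]
  cases nums with
  | nil => simp [split_list_old, PySem.List.enumerate_nil]
  | cons x xs =>
    unfold split_list_old
    rw [PySem.List.enumerate_cons]
    simp only [List.foldl_cons]
    show (((PySem.List.enumerate xs (0+1)).foldl pvStepA (pvStepA (-1, []) (0, x))).2).reverse = _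
    have : pvStepA (-1, ([] : List (List Int))) (0, x) = (x, [[x]]) := by
      simp [pvStepA]
    rw [this, master xs (0+1) x [x] [] (by omega)]
    rw [List.foldr_cons, stepB_eq_glue]
    simp
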